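-- pv_equiv track=rewrite | github.com/ffffffuck/Jumptopy | chapter.03/asdf.py | f
-- ===== SOURCE A (Python) =====
-- def f(s):
--     t = s.split()
--     go = int(t[0])
--     src = t[1:]
--     result = [None] * len(src)
--     for i in range(len(src)):
--         result[(i+go) %len(src)] = src[i]
--     return " ".join(result)
-- ===== SOURCE B (Python) =====
-- def f(s):
--     t = s.split()
--     go = int(t[0])
--     src = t[1:]
--     if not src:
--         return ""
--     g = go % len(src)
--     return " ".join(src[-g:] + src[:-g])
-- ===== Notes on version B (the rewrite author's own statement) =====
-- stated objective: simpler
-- what changed: B rotates by slicing and concatenating (src[-g:] + src[:-g] with g = go % n) instead of scatter-writing each element into a preallocated None list at index (i+go)%n.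
import Mathlib
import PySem

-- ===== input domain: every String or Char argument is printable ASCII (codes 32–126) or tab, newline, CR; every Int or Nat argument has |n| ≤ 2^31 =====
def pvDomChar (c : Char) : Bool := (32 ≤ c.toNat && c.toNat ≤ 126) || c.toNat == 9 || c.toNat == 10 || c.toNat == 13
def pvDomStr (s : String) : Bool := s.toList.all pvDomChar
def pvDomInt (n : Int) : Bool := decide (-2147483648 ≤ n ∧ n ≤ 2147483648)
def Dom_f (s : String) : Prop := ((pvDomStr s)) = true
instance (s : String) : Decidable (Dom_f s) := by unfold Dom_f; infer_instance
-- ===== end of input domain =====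

-- B rotates the word list by slicing + concatenation instead of A's element-by-element
-- modular scatter-write into a preallocated list; equality of the RETURN value is proved on Pre_f.

-- ===== PORT A =====
def f (s : String) : String :=
  let t := PySem.Str.split₀ s
  let go := (PySem.Int.ofStr? (PySem.List.pyGetD t 0 "")).getD 0
  let src := PySem.List.slice t (some 1) none
  let result := (PySem.List.pyRange 0 (src.length : Int) 1).foldl
    (fun r i => PySem.List.pySetD r (PySem.Int.mod (i + go) (src.length : Int))
                  (some (PySem.List.pyGetD src i "")))
    (List.replicate src.length (none : Option String))
  PySem.Str.join " " (result.map (fun o => o.getD ""))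

-- ===== PORT B =====
def f_alt (s : String) : String :=
  let t := PySem.Str.split₀ s
  let go := (PySem.Int.ofStr? (PySem.List.pyGetD t 0 "")).getD 0
  let src := PySem.List.slice t (some 1) none
  if src.isEmpty then "" else
    let g := PySem.Int.mod go (src.length : Int)
    PySem.Str.join " "
      (PySem.List.slice src (some (-g)) none ++ PySem.List.slice src none (some (-g)))

-- ===== PRECONDITION & SPEC =====
-- Pre_f excludes exactly the inputs where A raises: an all-whitespace s (t[0] is an
-- IndexError) and a first token that is not an int literal (int(t[0]) is a ValueError).
def Pre_f (s : String) : Prop :=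
  PySem.Str.split₀ s ≠ [] ∧
  (PySem.Int.ofStr? ((PySem.Str.split₀ s).headD "")).isSome = true
instance (s : String) : Decidable (Pre_f s) := by unfold Pre_f; infer_instance

def pvWitness_f : String := "2 a b c"

def Spec_f (s : String) (out : String) : Prop := out = f_alt s
instance (s : String) (out : String) : Decidable (Spec_f s out) := by unfold Spec_f; infer_instance

-- ===== CLAIM (what is proved, stated in full; the proofs are below) =====
def Claim_equal_f : Prop := ∀ (s : String), Dom_f s → Pre_f s → Spec_f s (f s)

-- ===== LEMMAS AND PROOFS =====

theorem foldl_set_length {α : Type} (l : List Nat) (idx : Nat → Nat) (w : Nat → α)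
    (init : List α) :
    (l.foldl (fun r i => r.set (idx i) (w i)) init).length = init.length := by
  induction l generalizing init with
  | nil => rfl
  | cons a l ih => simp [List.foldl_cons, ih, List.length_set]

theorem scatter_getElem? {α : Type} (w : Nat → α) (idx inv : Nat → Nat) (n : Nat)
    (hinv1 : ∀ i, i < n → inv (idx i) = i)
    (hinv2 : ∀ j, j < n → inv j < n ∧ idx (inv j) = j)
    (init : List α) (hlen : init.length = n)
    (k : Nat) (hk : k ≤ n) (j : Nat) (hj : j < n) :
    ((List.range k).foldl (fun r i => r.set (idx i) (w i)) init)[j]? =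
      if inv j < k then some (w (inv j)) else init[j]? := by
  induction k with
  | zero => simp
  | succ k ih =>
    have hk' : k ≤ n := Nat.le_of_succ_le hk
    rw [List.range_succ, List.foldl_append]
    simp only [List.foldl_cons, List.foldl_nil]
    by_cases hcase : idx k = j
    · have hinvj : inv j = k := by rw [← hcase, hinv1 k (by omega)]
      have hlen' : j < ((List.range k).foldl (fun r i => r.set (idx i) (w i)) init).length := by
        rw [foldl_set_length]; omega
      rw [hcase, List.getElem?_set_self hlen']
      simp [hinvj]
    · rw [List.getElem?_set_ne hcase, ih hk']
      have : inv j ≠ k := by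
        intro hc
        exact hcase (by rw [← hc]; exact (hinv2 j hj).2)
      by_cases h2 : inv j < k
      · simp [h2, Nat.lt_succ_of_lt h2]
      · have h3 : ¬ inv j < k + 1 := by omega
        simp [h2, h3]

theorem rot_main (src : List String) (go : Int) (h : src ≠ []) :
    ((PySem.List.pyRange 0 (src.length : Int) 1).foldl
        (fun r i => PySem.List.pySetD r (PySem.Int.mod (i + go) (src.length : Int))
          (some (PySem.List.pyGetD src i "")))
        (List.replicate src.length (none : Option String))).map (fun o => o.getD "") =
      PySem.List.slice src (some (-(PySem.Int.mod go (src.length : Int)))) none ++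
      PySem.List.slice src none (some (-(PySem.Int.mod go (src.length : Int)))) := by
  set n : Nat := src.length with hn
  have hn0 : 0 < n := List.length_pos_of_ne_nil h
  have hnI : (0:Int) < (n:Int) := by exact_mod_cast hn0
  have hnz : (n:Int) ≠ 0 := by omega
  have hemod_lt : ∀ a : Int, a % (n:Int) < (n:Int) := fun a => Int.emod_lt_of_pos a hnI
  have hemod_nn : ∀ a : Int, (0:Int) ≤ a % (n:Int) := fun a => Int.emod_nonneg a hnz
  set idx : Nat → Nat := fun i => (((i:Int) + go) % (n:Int)).toNat with hidxdef
  set inv : Nat → Nat := fun j => (((j:Int) - go) % (n:Int)).toNat with hinvdef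
  set w : Nat → Option String := fun i => some (src.getD i "") with hwdef
  have hfold :
      (PySem.List.pyRange 0 (n:Int) 1).foldl
        (fun r i => PySem.List.pySetD r (PySem.Int.mod (i + go) (n:Int))
          (some (PySem.List.pyGetD src i "")))
        (List.replicate n (none : Option String)) =
      (List.range n).foldl (fun r i => r.set (idx i) (w i))
        (List.replicate n (none : Option String)) := by
    rw [PySem.List.pyRange_one]
    simp only [Int.sub_zero, Int.toNat_natCast, List.foldl_map]
    congr 1
    funext r k
    simp only [zero_add]
    have hnn : (0:Int) ≤ ((k:Int) + go) % (n:Int) := hemod_nn _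
    rw [PySem.Int.mod_eq_emod_of_pos hnI, PySem.List.pySetD_of_nonneg _ _ hnn]
    simp [hidxdef, hwdef, PySem.List.pyGetD_natCast]
  rw [hfold]
  have hinv1 : ∀ i, i < n → inv (idx i) = i := by
    intro i hi
    simp only [hidxdef, hinvdef]
    rw [Int.toNat_of_nonneg (hemod_nn _)]
    have m1 : Int.ModEq (n:Int) (((i:Int) + go) % (n:Int)) ((i:Int) + go) :=
      Int.emod_emod_of_dvd _ dvd_rfl
    have h2 : ((((i:Int) + go) % (n:Int)) - go) % (n:Int) = ((i:Int) + go - go) % (n:Int) :=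
      m1.sub_right go
    rw [h2]
    simp only [add_sub_cancel_right]
    rw [Int.emod_eq_of_lt (by omega) (by exact_mod_cast hi)]
    omega
  have hinv2 : ∀ j, j < n → inv j < n ∧ idx (inv j) = j := by
    intro j hj
    constructor
    · simp only [hinvdef]
      have := hemod_lt ((j:Int) - go)
      have := hemod_nn ((j:Int) - go)
      omega
    · simp only [hidxdef, hinvdef]
      rw [Int.toNat_of_nonneg (hemod_nn _)]
      have m1 : Int.ModEq (n:Int) (((j:Int) - go) % (n:Int)) ((j:Int) - go) :=
        Int.emod_emod_of_dvd _ dvd_rfl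
      have h2 : ((((j:Int) - go) % (n:Int)) + go) % (n:Int) = ((j:Int) - go + go) % (n:Int) :=
        m1.add_right go
      rw [h2]
      simp only [sub_add_cancel]
      rw [Int.emod_eq_of_lt (by omega) (by exact_mod_cast hj)]
      omega
  have hL : ∀ j, (hj : j < n) →
      (((List.range n).foldl (fun r i => r.set (idx i) (w i))
        (List.replicate n (none : Option String))).map (fun o => o.getD ""))[j]? = src[inv j]? := by
    intro j hj
    rw [List.getElem?_map,
      scatter_getElem? w idx inv n hinv1 hinv2 _ (by simp) n (le_refl n) j hj]
    rw [if_pos (hinv2 j hj).1]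
    have h' : inv j < src.length := by rw [← hn]; exact (hinv2 j hj).1
    simp only [Option.map_some, hwdef, Option.getD_some]
    rw [List.getD_eq_getElem src "" h', List.getElem?_eq_getElem h']
  have hLlen : ((List.range n).foldl (fun r i => r.set (idx i) (w i))
      (List.replicate n (none : Option String))).length = n := by
    rw [foldl_set_length]; simp
  set g : Int := PySem.Int.mod go (n:Int) with hgdef
  have hgemod : g = go % (n:Int) := PySem.Int.mod_eq_emod_of_pos hnI
  set g' : Nat := g.toNat with hg'def
  have hgnn : (0:Int) ≤ g := hgemod ▸ hemod_nn go
  have hglt : g < (n:Int) := hgemod ▸ hemod_lt go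
  have hgcast : g = (g' : Int) := by omega
  have hg'lt : g' < n := by omega
  have hinvval : ∀ j : Nat, j < n → inv j = if j < g' then n - g' + j else j - g' := by
    intro j hj
    simp only [hinvdef]
    have m1 : Int.ModEq (n:Int) g go := hgemod ▸ Int.emod_emod_of_dvd go dvd_rfl
    have h1 : ((j:Int) - go) % (n:Int) = ((j:Int) - g) % (n:Int) :=
      ((m1.sub_left (j:Int)).symm : Int.ModEq (n:Int) ((j:Int) - go) ((j:Int) - g))
    rw [h1]
    by_cases hc : j < g'
    · have h2 : ((j:Int) - g) % (n:Int) = ((j:Int) - g + (n:Int)) % (n:Int) :=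
        (Int.add_emod_right _ _).symm
      rw [h2, Int.emod_eq_of_lt (by omega) (by omega)]
      rw [if_pos hc]; omega
    · rw [Int.emod_eq_of_lt (by omega) (by omega)]
      rw [if_neg hc]; omega
  have hRHS : PySem.List.slice src (some (-g)) none ++ PySem.List.slice src none (some (-g)) =
      src.drop (n - g') ++ src.take (n - g') := by
    by_cases hz : g' = 0
    · have hg0 : g = 0 := by omega
      rw [hg0]
      simp only [neg_zero, hz, Nat.sub_zero]
      rw [PySem.List.slice_zero_start, PySem.List.slice_none_none,
        PySem.List.slice_to src (le_refl 0)]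
      rw [hn]
      simp
    · rw [hgcast, PySem.List.slice_from_neg_natCast src g' (Nat.pos_of_ne_zero hz),
        PySem.List.slice_to_neg_natCast src g' (Nat.pos_of_ne_zero hz), ← hn]
  rw [hRHS]
  apply List.ext_getElem?
  intro j
  by_cases hj : j < n
  · rw [hL j hj, hinvval j hj]
    by_cases hc : j < g'
    · rw [if_pos hc, List.getElem?_append_left (by simp [← hn]; omega)]
      rw [List.getElem?_drop]
    · rw [if_neg hc, List.getElem?_append_right (by simp [← hn]; omega)]
      simp only [List.length_drop, ← hn]
      rw [List.getElem?_take, if_pos (by omega)]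
      rw [List.getElem?_eq_getElem (by rw [← hn]; omega),
        List.getElem?_eq_getElem (by rw [← hn]; omega)]
      simp only [Option.some.injEq]
      congr 1
      omega
  · rw [List.getElem?_eq_none (by rw [List.length_map, hLlen]; omega),
      List.getElem?_eq_none (by simp [← hn]; omega)]

-- ===== VERDICT (by name: the statement is the Claim_ definition above) =====
theorem f_spec : Claim_equal_f := by
  intro s _ _
  show f s = f_alt s
  simp only [f, f_alt]
  by_cases hsrc : (PySem.List.slice (PySem.Str.split₀ s) (some 1) none).isEmpty
  · have h0 : PySem.List.slice (PySem.Str.split₀ s) (some 1) none = ([] : List String) := by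
      simpa [List.isEmpty_iff] using hsrc
    rw [h0, if_pos (by simp)]
    rw [List.length_nil]
    rw [show ((0:Nat):Int) = (0:Int) by rfl]
    rw [PySem.List.pyRange_one_eq_nil (le_refl 0)]
    rfl
  · have h0 : PySem.List.slice (PySem.Str.split₀ s) (some 1) none ≠ ([] : List String) := by
      simpa [List.isEmpty_iff] using hsrc
    rw [if_neg (by simpa [List.isEmpty_iff] using hsrc)]
    exact congrArg (PySem.Str.join " ") (rot_main _ _ h0)
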